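-- pv_equiv track=rewrite | github.com/wggraham/interview-prep | interviewbit/Google/regular-expression-ii.py | __remove_redundant_items__
-- ===== SOURCE A (Python) =====
-- def __remove_redundant_items__(pattern):
--     temp, i = [], 0
--     while i < len(pattern):
--         temp.append(pattern[i])
--
--         if pattern[i] == '*':
--             while i < len(pattern) and pattern[i] == '*':
--                 i += 1
--             i -= 1
--         i += 1
--     return temp
-- ===== SOURCE B (Python) =====
-- def __remove_redundant_items__(pattern):
--     temp = []
--     for c in pattern:
--         if c != '*' or not temp or temp[-1] != '*':
--             temp.append(c)
--     return temp
-- ===== Notes on version B (the rewrite author's own statement) =====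
-- stated objective: simpler
-- what changed: Replaced the index-driven scan (repeated len() calls and subscripting, with an inner run-skipping while and i-=1/i+=1 bookkeeping) by a single flat look-back for-loop that appends each character unless the output already ends in a star and the character is a star.
import Mathlib
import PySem

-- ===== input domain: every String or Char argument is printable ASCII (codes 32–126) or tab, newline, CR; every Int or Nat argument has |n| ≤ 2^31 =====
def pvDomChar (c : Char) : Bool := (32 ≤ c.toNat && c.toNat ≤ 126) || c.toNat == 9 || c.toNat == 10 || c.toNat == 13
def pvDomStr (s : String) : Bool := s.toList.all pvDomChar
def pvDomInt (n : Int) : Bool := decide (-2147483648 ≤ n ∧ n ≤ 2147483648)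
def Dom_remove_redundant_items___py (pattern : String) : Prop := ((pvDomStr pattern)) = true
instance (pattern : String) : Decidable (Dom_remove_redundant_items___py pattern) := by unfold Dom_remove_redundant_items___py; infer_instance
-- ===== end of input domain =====

-- B replaces A's index scan with inner '*'-run skipping by a single flat look-back pass (simpler).


-- ===== PORT A =====
-- inner while: 'while i < len(pattern) and pattern[i] == '*': i += 1' followed by 'i -= 1';
-- together with the outer 'i += 1' this leaves i at the first non-'*' position, i.e. it
-- drops the remaining '*' run.
def pvSkipStars : List Char → List Char
  | [] => []
  | c :: rest => if c = '*' then pvSkipStars rest else c :: rest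

theorem pvSkipStars_length_le (l : List Char) : (pvSkipStars l).length ≤ l.length := by
  induction l with
  | nil => simp [pvSkipStars]
  | cons c rest ih =>
    simp only [pvSkipStars]
    split
    · exact Nat.le_succ_of_le ih
    · simp

-- outer 'while i < len(pattern)' over the remaining characters; temp.append(pattern[i]) first,
-- then the '*' branch advances past the run.
def pvALoop : List Char → List String
  | [] => []
  | c :: rest =>
    String.ofList [c] :: (if c = '*' then pvALoop (pvSkipStars rest) else pvALoop rest)
termination_by l => l.length
decreasing_by
  · have := pvSkipStars_length_le rest; simp; omega
  · simp

def remove_redundant_items___py (pattern : String) : List String :=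
  pvALoop pattern.toList

-- ===== PORT B =====
-- 'for c in pattern: if c != '*' or not temp or temp[-1] != '*': temp.append(c)'
def pvBStep (temp : List String) (c : Char) : List String :=
  if c ≠ '*' ∨ temp = [] ∨ temp.getLast? ≠ some "*" then temp ++ [String.ofList [c]] else temp

def remove_redundant_items___py_alt (pattern : String) : List String :=
  pattern.toList.foldl pvBStep []

-- ===== PRECONDITION & SPEC =====
def Spec_remove_redundant_items___py (pattern : String) (out : List String) : Prop := out = remove_redundant_items___py_alt pattern
instance (pattern : String) (out : List String) : Decidable (Spec_remove_redundant_items___py pattern out) := by unfold Spec_remove_redundant_items___py; infer_instance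

-- ===== CLAIM (what is proved, stated in full; the proofs are below) =====
def Claim_equal_remove_redundant_items___py : Prop := ∀ (pattern : String), Dom_remove_redundant_items___py pattern → Spec_remove_redundant_items___py pattern (remove_redundant_items___py pattern)

-- ===== LEMMAS AND PROOFS =====

theorem pvMk_ne_star {c : Char} (h : c ≠ '*') : String.ofList [c] ≠ "*" := by
  intro he
  apply h
  have := congrArg String.toList he
  simpa using this

-- B's fold with accumulator temp equals temp followed by A's loop; when temp already ends in
-- "*", the leading '*' run of the remaining input is dropped first.
theorem pvFold_eq (l : List Char) : ∀ temp : List String,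
    l.foldl pvBStep temp =
      temp ++ (if temp.getLast? = some "*" then pvALoop (pvSkipStars l) else pvALoop l) := by
  induction l with
  | nil => intro temp; split <;> simp [pvALoop, pvSkipStars]
  | cons c rest ih =>
    intro temp
    by_cases hc : c = '*'
    · subst hc
      by_cases hl : temp.getLast? = some "*"
      · -- char '*' dropped: condition of pvBStep is false
        have hne : temp ≠ [] := by intro h; simp [h] at hl
        simp only [List.foldl_cons, pvBStep, hl, hne]
        rw [if_neg (by simp [hl, hne])]
        rw [ih temp]
        simp [hl, pvSkipStars]
      · -- '*' appended, new last is "*"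
        simp only [List.foldl_cons, pvBStep]
        rw [if_pos (Or.inr (Or.inr hl))]
        rw [ih (temp ++ [String.ofList ['*']])]
        have : (temp ++ [String.ofList ['*']]).getLast? = some "*" := by
          simp [List.getLast?_append]
        rw [if_neg hl, this, if_pos rfl]
        simp [pvALoop]
    · -- non-'*' always appended, new last is not "*"
      simp only [List.foldl_cons, pvBStep]
      rw [if_pos (Or.inl hc)]
      rw [ih (temp ++ [String.ofList [c]])]
      have hlast : (temp ++ [String.ofList [c]]).getLast? = some (String.ofList [c]) := by
        simp [List.getLast?_append]
      rw [hlast]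
      rw [if_neg (by simp [pvMk_ne_star hc])]
      by_cases hl : temp.getLast? = some "*"
      · rw [if_pos hl]
        simp [pvSkipStars, hc, pvALoop]
      · rw [if_neg hl]
        simp [pvALoop, hc]

-- ===== VERDICT (by name: the statement is the Claim_ definition above) =====
theorem remove_redundant_items___py_spec : Claim_equal_remove_redundant_items___py := by
  intro pattern _
  unfold Spec_remove_redundant_items___py remove_redundant_items___py remove_redundant_items___py_alt
  rw [pvFold_eq pattern.toList []]
  simp
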